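-- pv_equiv track=rewrite | github.com/olivia-ea/hb-coding-challenges | freq_of_max.py | freq_of_max
-- ===== SOURCE A (Python) =====
-- def find_count(max_num, array):
--
--     return array.count(max_num)
--
-- def freq_of_max(price):
--
--     num_freq = []
--
--     while price:
--         for num in price:
--             max_num = max(price)
--             count = find_count(max_num, price)
--             num_freq.append(count)
--             price.pop(0)
--
--     return num_freq
-- ===== SOURCE B (Python) =====
-- def freq_of_max(price):
--     # Right-to-left scan: maintain the running suffix maximum and its count.
--     # Note: unlike A, B does not mutate its argument (A empties `price`).
--     res = []
--     best = None
--     cnt = 0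
--     for x in reversed(price):
--         if best is None or x > best:
--             best = x
--             cnt = 1
--         elif x == best:
--             cnt += 1
--         res.append(cnt)
--     res.reverse()
--     return res
-- ===== Notes on version B (the rewrite author's own statement) =====
-- stated objective: faster
-- what changed: Replaced the nested while/for with repeated max() and count() over the remaining list (and pop(0)) by a single right-to-left scan that maintains the running suffix maximum and its count, then reverses; B also leaves the input list unmutated where A empties it.
import Mathlib
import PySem

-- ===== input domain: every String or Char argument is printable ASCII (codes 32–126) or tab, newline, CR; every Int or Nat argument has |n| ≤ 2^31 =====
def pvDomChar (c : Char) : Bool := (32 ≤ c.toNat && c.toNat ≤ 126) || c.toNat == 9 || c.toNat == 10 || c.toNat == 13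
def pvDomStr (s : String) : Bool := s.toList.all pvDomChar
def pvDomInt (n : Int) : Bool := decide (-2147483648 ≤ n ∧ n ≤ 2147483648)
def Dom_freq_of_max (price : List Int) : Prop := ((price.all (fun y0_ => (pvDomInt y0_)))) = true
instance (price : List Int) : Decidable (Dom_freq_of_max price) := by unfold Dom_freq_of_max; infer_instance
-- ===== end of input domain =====

-- B replaces A's quadratic rescan of each suffix by one right-to-left scan keeping the running
-- suffix max and its count (equivalence is about the RETURN value: A empties `price`, B does not mutate it).

-- ===== PORT A =====
-- find_count(max_num, array) = array.count(max_num)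
def pvFindCount (max_num : Int) (array : List Int) : Int :=
  (PySem.List.count array max_num : Int)

-- the `for num in price` loop: Python's list iterator index k advances while pop(0) shrinks the
-- list; the loop body runs exactly while k < len(price).  Each step: max_num = max(price),
-- append count, pop(0).  max(price) on a nonempty list x::t is t.foldl max x.
def pvForLoop : List Int → Nat → List Int → List Int × List Int
  | price, k, num_freq =>
    if k < price.length then
      match price with
      | [] => ([], num_freq)            -- unreachable: k < length
      | x :: t =>
          let max_num := t.foldl max x
          let count := pvFindCount max_num (x :: t)
          pvForLoop t (k + 1) (num_freq ++ [count])
    else (price, num_freq)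

-- the `while price:` loop
def pvWhileLoop (price : List Int) (num_freq : List Int) : List Int :=
  match price with
  | [] => num_freq
  | x :: t =>
      let r := pvForLoop (x :: t) 0 num_freq
      pvWhileLoop r.1 r.2
termination_by price.length
decreasing_by
  have h : (pvForLoop (x :: t) 0 num_freq).1.length < (x :: t).length := by
    have step : pvForLoop (x :: t) 0 num_freq
        = pvForLoop t 1 (num_freq ++ [pvFindCount (t.foldl max x) (x :: t)]) := by
      rw [pvForLoop]; simp
    have bound : ∀ (l : List Int) (k : Nat) (acc : List Int),
        (pvForLoop l k acc).1.length ≤ l.length := by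
      intro l
      induction l with
      | nil => intro k acc; rw [pvForLoop]; simp
      | cons y ys ih =>
          intro k acc
          rw [pvForLoop]
          split
          · exact le_trans (ih _ _) (by simp)
          · simp
    calc (pvForLoop (x :: t) 0 num_freq).1.length
        = (pvForLoop t 1 (num_freq ++ [pvFindCount (t.foldl max x) (x :: t)])).1.length := by
          rw [step]
      _ ≤ t.length := bound _ _ _
      _ < (x :: t).length := by simp
  simpa using h

def freq_of_max (price : List Int) : List Int :=
  pvWhileLoop price []

-- ===== PORT B =====
-- the `for x in reversed(price)` loop of Source B, carrying (best, cnt, res)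
def pvGoB : List Int → Option Int → Int → List Int → List Int
  | [], _, _, res => res
  | x :: rest, best, cnt, res =>
      match best with
      | none => pvGoB rest (some x) 1 (res ++ [1])
      | some b =>
          if x > b then pvGoB rest (some x) 1 (res ++ [1])
          else if x = b then pvGoB rest (some b) (cnt + 1) (res ++ [cnt + 1])
          else pvGoB rest (some b) cnt (res ++ [cnt])

def freq_of_max_alt (price : List Int) : List Int :=
  (pvGoB price.reverse none 0 []).reverse

-- ===== PRECONDITION & SPEC =====
def Spec_freq_of_max (price : List Int) (out : List Int) : Prop := out = freq_of_max_alt price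
instance (price : List Int) (out : List Int) : Decidable (Spec_freq_of_max price out) := by unfold Spec_freq_of_max; infer_instance

-- ===== CLAIM (what is proved, stated in full; the proofs are below) =====
def Claim_equal_freq_of_max : Prop := ∀ (price : List Int), Dom_freq_of_max price → Spec_freq_of_max price (freq_of_max price)

-- ===== LEMMAS AND PROOFS =====

/-- The common characterisation: for each suffix, the count of its maximum. -/
def suffCounts : List Int → List Int
  | [] => []
  | x :: t => (PySem.List.count (x :: t) (t.foldl max x) : Int) :: suffCounts t

-- ---- generic max facts ----
theorem foldl_max_swap (l : List Int) (a b : Int) :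
    l.foldl max (max a b) = max a (l.foldl max b) := by
  induction l generalizing b with
  | nil => simp
  | cons y ys ih =>
      simp only [List.foldl_cons]
      rw [max_assoc, ih]

theorem le_foldl_max (l : List Int) (a : Int) : a ≤ l.foldl max a := by
  induction l generalizing a with
  | nil => simp
  | cons y ys ih =>
      simp only [List.foldl_cons]
      exact le_trans (le_max_left a y) (ih _)

theorem mem_le_foldl_max (l : List Int) (a x : Int) (hx : x ∈ l) : x ≤ l.foldl max a := by
  induction l generalizing a with
  | nil => simp at hx
  | cons y ys ih =>
      simp only [List.foldl_cons]
      rcases List.mem_cons.mp hx with h | h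
      · subst h
        exact le_trans (le_max_right a x) (le_foldl_max _ _)
      · exact ih _ h

-- ---- A-side ----
theorem suffCounts_drop (price : List Int) (j : Nat) :
    suffCounts (price.drop j) = (suffCounts price).drop j := by
  induction price generalizing j with
  | nil => simp [suffCounts]
  | cons x t ih =>
      cases j with
      | zero => simp
      | succ j' => simpa [suffCounts] using ih j'

theorem pvForLoop_spec (price : List Int) (k : Nat) (acc : List Int) :
    ∃ j, pvForLoop price k acc = (price.drop j, acc ++ (suffCounts price).take j)
      ∧ (k < price.length → 0 < j) := by
  induction price generalizing k acc with
  | nil =>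
      refine ⟨0, ?_, by simp⟩
      rw [pvForLoop]; simp
  | cons x t ih =>
      by_cases hk : k < (x :: t).length
      · obtain ⟨j', hj', _⟩ := ih (k + 1) (acc ++ [pvFindCount (t.foldl max x) (x :: t)])
        refine ⟨j' + 1, ?_, by omega⟩
        rw [pvForLoop]
        simp only [hk, if_true]
        rw [hj']
        simp [suffCounts, pvFindCount, List.append_assoc]
      · refine ⟨0, ?_, by omega⟩
        rw [pvForLoop, if_neg hk]; simp

theorem pvWhileLoop_spec (price : List Int) (acc : List Int) :
    pvWhileLoop price acc = acc ++ suffCounts price := by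
  induction hn : price.length using Nat.strong_induction_on generalizing price acc with
  | _ n ih =>
      cases price with
      | nil => rw [pvWhileLoop]; simp [suffCounts]
      | cons x t =>
          rw [pvWhileLoop]
          obtain ⟨j, hj, hpos⟩ := pvForLoop_spec (x :: t) 0 acc
          have hj1 : 0 < j := hpos (by simp)
          rw [hj]
          simp only
          have hn' : t.length + 1 = n := by simpa using hn
          have hlen : ((x :: t).drop j).length < n := by
            rw [List.length_drop]
            simp only [List.length_cons]
            omega
          rw [ih _ hlen _ _ rfl]
          rw [suffCounts_drop, List.append_assoc, List.take_append_drop]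
theorem freq_of_max_eq (price : List Int) : freq_of_max price = suffCounts price := by
  unfold freq_of_max
  simpa using pvWhileLoop_spec price []

-- ---- B-side ----
/-- Pure version of pvGoB's emissions: pvGoB only appends to `res`. -/
def pvPureB : List Int → Option Int → Int → List Int
  | [], _, _ => []
  | x :: rest, best, cnt =>
      match best with
      | none => 1 :: pvPureB rest (some x) 1
      | some b =>
          if x > b then 1 :: pvPureB rest (some x) 1
          else if x = b then (cnt + 1) :: pvPureB rest (some b) (cnt + 1)
          else cnt :: pvPureB rest (some b) cnt

theorem pvGoB_eq_pure (l : List Int) (best : Option Int) (cnt : Int) (res : List Int) :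
    pvGoB l best cnt res = res ++ pvPureB l best cnt := by
  induction l generalizing best cnt res with
  | nil => simp [pvGoB, pvPureB]
  | cons x rest ih =>
      cases best with
      | none => simp [pvGoB, pvPureB, ih]
      | some b =>
          by_cases h1 : x > b
          · simp [pvGoB, pvPureB, h1, ih]
          · by_cases h2 : x = b
            · simp [pvGoB, pvPureB, h2, ih]
            · simp [pvGoB, pvPureB, h1, h2, ih]

/-- What a processed prefix `p` (in reversed order) forces the state to be. -/
def pvStateOk (p : List Int) (best : Option Int) (cnt : Int) : Prop :=
  match p with
  | [] => best = none
  | y :: ys =>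
      best = some (ys.foldl max y) ∧ cnt = (PySem.List.count (y :: ys) (ys.foldl max y) : Int)

/-- Forward description of the emitted counts, one per element, against the processed prefix. -/
def pvFwd : List Int → List Int → List Int
  | [], _ => []
  | x :: rest, p => (PySem.List.count (x :: p) (p.foldl max x) : Int) :: pvFwd rest (x :: p)

theorem count_cons_int (x v : Int) (l : List Int) :
    (PySem.List.count (x :: l) v : Int)
      = (if x = v then 1 else 0) + (PySem.List.count l v : Int) := by
  simp only [PySem.List.count_eq, List.count_cons]
  by_cases h : x = v
  · simp [h]; omega
  · simp [h]

theorem pvPureB_eq_fwd (l : List Int) (p : List Int) (best : Option Int) (cnt : Int)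
    (hs : pvStateOk p best cnt) : pvPureB l best cnt = pvFwd l p := by
  induction l generalizing p best cnt with
  | nil => simp [pvPureB, pvFwd]
  | cons x rest ih =>
      cases p with
      | nil =>
          have hb : best = none := hs
          subst hb
          simp only [pvPureB, pvFwd]
          have : (PySem.List.count [x] (List.foldl max x []) : Int) = 1 := by
            simp [PySem.List.count_eq]
          rw [this]
          exact congrArg _ (ih [x] (some x) 1 ⟨rfl, by simp [PySem.List.count_eq]⟩)
      | cons y ys =>
          obtain ⟨hb, hc⟩ := hs
          subst hb
          set m := ys.foldl max y with hm
          have hmax : (y :: ys).foldl max x = max x m := by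
            simp only [List.foldl_cons]
            rw [← foldl_max_swap]
          by_cases h1 : x > m
          · -- new strict maximum: x ∉ y :: ys, count = 1
            have hfold : (y :: ys).foldl max x = x := by
              rw [hmax]; exact max_eq_left (le_of_lt h1)
            have hy : x ∉ y :: ys := by
              intro hmem
              rcases List.mem_cons.mp hmem with h | h
              · subst h; exact absurd (le_foldl_max ys x) (by omega)
              · exact absurd (mem_le_foldl_max ys y x h) (by omega)
            have hcount1 : (PySem.List.count (x :: y :: ys) x : Int) = 1 := by
              rw [count_cons_int]
              have h0 : (PySem.List.count (y :: ys) x : Int) = 0 := by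
                rw [PySem.List.count_eq]
                exact_mod_cast congrArg (Nat.cast : Nat → Int) (List.count_eq_zero.mpr hy)
              rw [h0]; simp
            simp only [pvPureB, pvFwd]
            rw [if_pos h1, hfold, hcount1]
            exact congrArg _ (ih (x :: y :: ys) (some x) 1
              ⟨by rw [hfold], by rw [hfold]; exact hcount1.symm⟩)
          · by_cases h2 : x = m
            · -- equal to the maximum: count goes up by one
              have hmx : (y :: ys).foldl max x = m := by rw [hmax, h2]; simp
              have hcount2 : (PySem.List.count (x :: y :: ys) m : Int) = cnt + 1 := by
                rw [count_cons_int, if_pos h2, ← hc]; ring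
              simp only [pvPureB, pvFwd]
              rw [if_neg h1, if_pos h2, hmx, hcount2]
              exact congrArg _ (ih (x :: y :: ys) (some m) (cnt + 1)
                ⟨by rw [hmx], by rw [hmx]; exact hcount2.symm⟩)
            · -- below the maximum: count unchanged
              have hlt : x < m := by omega
              have hmx : (y :: ys).foldl max x = m := by
                rw [hmax]; exact max_eq_right (le_of_lt hlt)
              have hcount3 : (PySem.List.count (x :: y :: ys) m : Int) = cnt := by
                rw [count_cons_int, if_neg h2, ← hc]; ring
              simp only [pvPureB, pvFwd]
              rw [if_neg h1, if_neg h2, hmx, hcount3]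
              exact congrArg _ (ih (x :: y :: ys) (some m) cnt
                ⟨by rw [hmx], by rw [hmx]; exact hcount3.symm⟩)

theorem pvFwd_reverse (l p : List Int) :
    (pvFwd l p).reverse ++ suffCounts p = suffCounts (l.reverse ++ p) := by
  induction l generalizing p with
  | nil => simp [pvFwd]
  | cons x rest ih =>
      simp only [pvFwd, List.reverse_cons, List.append_assoc, List.singleton_append]
      have h : (PySem.List.count (x :: p) (p.foldl max x) : Int) :: suffCounts p
          = suffCounts (x :: p) := by simp [suffCounts]
      rw [h, ih (x :: p)]

theorem freq_of_max_alt_eq (price : List Int) : freq_of_max_alt price = suffCounts price := by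
  unfold freq_of_max_alt
  rw [pvGoB_eq_pure, pvPureB_eq_fwd price.reverse [] none 0 rfl]
  have := pvFwd_reverse price.reverse []
  simp only [List.append_nil, suffCounts, List.reverse_reverse] at this
  simpa using this

-- ===== VERDICT (by name: the statement is the Claim_ definition above) =====
theorem freq_of_max_spec : Claim_equal_freq_of_max := by
  intro price _
  unfold Spec_freq_of_max
  rw [freq_of_max_eq, freq_of_max_alt_eq]
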